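-- pv_equiv track=rewrite | github.com/Misha86/python-online-marathon | 2_sprint/1_question.py | double_string
-- ===== SOURCE A (Python) =====
-- def double_string(d: list) -> int:
--     """Concatenate of two strings from this arguments  list
--     :param d: list
--     :return: int
--     """
--     total_count = 0
--     for s in d:
--         if s*2 in d:
--             total_count += 1
--         else:
--             for j in set(d):
--                 total_count += True if (s + j) in d else False
--     return total_count
-- ===== SOURCE B (Python) =====
-- def double_string(d: list) -> int:
--     """Concatenate of two strings from this arguments  list
--     :param d: list
--     :return: int
--     """
--     present = set(d)
--     total = 0
--     for s in d:
--         if s + s in present: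
--             total += 1
--         else:
--             total += sum(1 for t in present
--                          if t.startswith(s) and t[len(s):] in present)
--     return total
-- ===== Notes on version B (the rewrite author's own statement) =====
-- stated objective: faster
-- what changed: A tests every candidate s+j (for all distinct j) by a linear scan of the list; B builds the set once and, in the else-branch, filters the existing strings t by t.startswith(s) with suffix t[len(s):] in the set, inverting generate-and-test into filter-existing with O(1) set membership.
import Mathlib
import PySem

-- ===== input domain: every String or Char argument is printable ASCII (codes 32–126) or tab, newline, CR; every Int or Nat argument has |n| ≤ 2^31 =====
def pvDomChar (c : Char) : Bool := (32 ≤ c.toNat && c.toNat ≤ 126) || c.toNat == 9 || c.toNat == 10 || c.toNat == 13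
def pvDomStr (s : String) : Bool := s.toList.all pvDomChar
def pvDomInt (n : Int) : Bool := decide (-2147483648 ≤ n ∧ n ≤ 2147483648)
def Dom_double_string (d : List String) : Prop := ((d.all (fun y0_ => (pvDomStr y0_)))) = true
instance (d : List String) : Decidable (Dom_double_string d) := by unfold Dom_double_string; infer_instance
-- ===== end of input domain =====

-- B replaces A's generate-and-test inner loop (try every candidate s+j against the list) by a
-- filter over the precomputed set: count existing t with t.startswith(s) and t[len(s):] in the set.
-- Objective: faster (set built once, membership is set-based, and no candidate strings are built).

-- ===== PORT A =====
def double_string (d : List String) : Int :=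
  d.foldl (fun total_count s =>
    if (s ++ s) ∈ d then total_count + 1
    else (PySem.Set.ofList d).foldl
      (fun tc j => tc + (if (s ++ j) ∈ d then (1 : Int) else 0)) total_count) 0

-- ===== PORT B =====
def double_string_alt (d : List String) : Int :=
  let present := PySem.Set.ofList d
  d.foldl (fun total s =>
    if PySem.Set.contains present (s ++ s) then total + 1
    else total + ((present.countP
        (fun t => PySem.Str.startswith t s &&
          PySem.Set.contains present (PySem.Str.slice t (some (PySem.Str.len s)) none))) : Int)) 0

-- ===== PRECONDITION & SPEC =====
def Spec_double_string (d : List String) (out : Int) : Prop := out = double_string_alt d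
instance (d : List String) (out : Int) : Decidable (Spec_double_string d out) := by unfold Spec_double_string; infer_instance

-- ===== CLAIM (what is proved, stated in full; the proofs are below) =====
def Claim_equal_double_string : Prop := ∀ (d : List String), Dom_double_string d → Spec_double_string d (double_string d)

-- ===== LEMMAS AND PROOFS =====

theorem pv_contains_iff (S : List String) (x : String) :
    PySem.Set.contains S x = true ↔ x ∈ S := by
  simp [PySem.Set.contains]

theorem pv_append_inj (s : String) : Function.Injective (fun j => s ++ j) := by
  intro a b h
  have h' : (s ++ a).toList = (s ++ b).toList := congrArg String.toList h
  rw [String.toList_append, String.toList_append] at h'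
  exact String.toList_inj.mp (List.append_cancel_left h')

-- B's filter predicate characterised: t passes iff t = s ++ j for some j in S.
theorem pv_pred_iff (S : List String) (s t : String) :
    (PySem.Str.startswith t s &&
      PySem.Set.contains S (PySem.Str.slice t (some (PySem.Str.len s)) none)) = true
    ↔ ∃ j ∈ S, t = s ++ j := by
  have hslice : (PySem.Str.slice t (some (PySem.Str.len s)) none).toList
      = t.toList.drop s.toList.length := by
    simp [PySem.Str.toList_slice, PySem.Str.len]
  constructor
  · rintro h
    rw [Bool.and_eq_true] at h
    obtain ⟨h1, h2⟩ := h
    rw [PySem.Str.startswith_eq, PySem.Chars.startswith_iff] at h1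
    refine ⟨PySem.Str.slice t (some (PySem.Str.len s)) none,
      (pv_contains_iff _ _).mp h2, ?_⟩
    apply String.toList_inj.mp
    rw [String.toList_append, hslice]
    obtain ⟨u, hu⟩ := h1
    rw [← hu]
    simp
  · rintro ⟨j, hj, rfl⟩
    rw [Bool.and_eq_true]
    constructor
    · rw [PySem.Str.startswith_eq, PySem.Chars.startswith_iff, String.toList_append]
      exact ⟨j.toList, rfl⟩
    · rw [pv_contains_iff]
      have : PySem.Str.slice (s ++ j) (some (PySem.Str.len s)) none = j := by
        apply String.toList_inj.mp
        rw [hslice, String.toList_append]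
        simp
      rwa [this]

-- The counting bijection: candidates j with s++j present ↔ present strings t that split as s ++ (member).
theorem pv_count_eq (S : List String) (hS : S.Nodup) (s : String) :
    (S.filter (fun j => decide ((s ++ j) ∈ S))).length
      = S.countP (fun t => PySem.Str.startswith t s &&
          PySem.Set.contains S (PySem.Str.slice t (some (PySem.Str.len s)) none)) := by
  rw [List.countP_eq_length_filter]
  have hperm : ((S.filter (fun j => decide ((s ++ j) ∈ S))).map (fun j => s ++ j)).Perm
      (S.filter (fun t => PySem.Str.startswith t s &&
          PySem.Set.contains S (PySem.Str.slice t (some (PySem.Str.len s)) none))) := by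
    rw [List.perm_ext_iff_of_nodup
      ((hS.filter _).map (pv_append_inj s)) (hS.filter _)]
    intro t
    simp only [List.mem_map, List.mem_filter, decide_eq_true_eq, pv_pred_iff]
    constructor
    · rintro ⟨j, ⟨hjS, hmem⟩, rfl⟩
      exact ⟨hmem, j, hjS, rfl⟩
    · rintro ⟨htS, j, hjS, rfl⟩
      exact ⟨j, ⟨hjS, htS⟩, rfl⟩
  have := hperm.length_eq
  simpa using this

-- A's inner loop over set(d) equals B's count, for any accumulator.
theorem pv_inner_eq (d : List String) (s : String) (tc : Int) :
    (PySem.Set.ofList d).foldl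
      (fun tc j => tc + (if (s ++ j) ∈ d then (1 : Int) else 0)) tc
    = tc + ((PySem.Set.ofList d).countP
        (fun t => PySem.Str.startswith t s &&
          PySem.Set.contains (PySem.Set.ofList d) (PySem.Str.slice t (some (PySem.Str.len s)) none)) : Int) := by
  rw [PySem.List.foldl_add]
  congr 1
  have hmemd : ∀ j : String, ((s ++ j) ∈ d) = ((s ++ j) ∈ PySem.Set.ofList d) := by
    intro j; simp [PySem.Set.mem_ofList]
  have hgen : ∀ (L : List String) (p : String → Prop) [DecidablePred p],
      (L.map (fun j => if p j then (1 : Int) else 0)).sum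
        = ((L.filter (fun j => decide (p j))).length : Int) := by
    intro L p _
    induction L with
    | nil => simp
    | cons x xs ih =>
      simp only [List.map_cons, List.sum_cons, List.filter_cons, ih]
      by_cases h : p x <;> simp [h]
      omega
  simp only [hmemd]
  rw [hgen (PySem.Set.ofList d) (fun j => (s ++ j) ∈ PySem.Set.ofList d),
    pv_count_eq _ (PySem.Set.nodup_ofList d) s]

-- ===== VERDICT (by name: the statement is the Claim_ definition above) =====
theorem double_string_spec : Claim_equal_double_string := by
  intro d _
  show double_string d = double_string_alt d
  unfold double_string double_string_alt
  have hstep : (fun (total_count : Int) (s : String) =>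
      if (s ++ s) ∈ d then total_count + 1
      else (PySem.Set.ofList d).foldl
        (fun tc j => tc + (if (s ++ j) ∈ d then (1 : Int) else 0)) total_count)
    = (fun (total : Int) (s : String) =>
      if PySem.Set.contains (PySem.Set.ofList d) (s ++ s) then total + 1
      else total + ((PySem.Set.ofList d).countP
        (fun t => PySem.Str.startswith t s &&
          PySem.Set.contains (PySem.Set.ofList d)
            (PySem.Str.slice t (some (PySem.Str.len s)) none)) : Int)) := by
    funext tc s
    have hdd : ((s ++ s) ∈ d) = (PySem.Set.contains (PySem.Set.ofList d) (s ++ s) = true) := by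
      simp [PySem.Set.mem_ofList]
    by_cases h : (s ++ s) ∈ d
    · rw [if_pos h, if_pos (by rw [← hdd]; exact h)]
    · rw [if_neg h, if_neg (by rw [← hdd]; exact h), pv_inner_eq]
  exact congrArg (fun f => List.foldl f 0 d) hstep
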